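-- pv_equiv track=rewrite | github.com/pypi-data/pypi-mirror-251 | packages/opigen/opigen-1.0.6-py3-none-any.whl/opigen/opimodel/utils.py | mangle_name
-- ===== SOURCE A (Python) =====
-- def mangle_name(name):
--     """Convert the name found in a color or font configuration file into
--        a Python variable:
--            - convert to upper-case
--            - replace non-letters with underscores
--            - avoid consecutive underscores
--
--     Args:
--         name to convert
--     Returns:
--         converted name
--     """
--     last = ''
--     deduped = []
--     for char in name:
--         if not char.isalpha() and not char.isdigit():
--             if last == '_':
--                 continue
--             else:
--                 char = '_'
--         last = char
--         deduped.append(char)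
--
--     name = ''.join(deduped).upper()
--     return name
-- ===== SOURCE B (Python) =====
-- def mangle_name(name):
--     """Two-pass version: transliterate each char (keep letters/digits, else
--     '_'), then collapse each run of underscores to one, then upper-case."""
--     mapped = [c if c.isalpha() or c.isdigit() else '_' for c in name]
--     out = []
--     i = 0
--     n = len(mapped)
--     while i < n:
--         c = mapped[i]
--         out.append(c)
--         i += 1
--         if c == '_':
--             while i < n and mapped[i] == '_':
--                 i += 1
--     return ''.join(out).upper()
-- ===== Notes on version B (the rewrite author's own statement) =====
-- stated objective: alternative
-- what changed: Replaced the single stateful loop that tracks the last appended character with a two-pass decomposition: transliterate every character to itself or an underscore, then collapse each underscore run by skipping ahead, then upper-case.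
import Mathlib
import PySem

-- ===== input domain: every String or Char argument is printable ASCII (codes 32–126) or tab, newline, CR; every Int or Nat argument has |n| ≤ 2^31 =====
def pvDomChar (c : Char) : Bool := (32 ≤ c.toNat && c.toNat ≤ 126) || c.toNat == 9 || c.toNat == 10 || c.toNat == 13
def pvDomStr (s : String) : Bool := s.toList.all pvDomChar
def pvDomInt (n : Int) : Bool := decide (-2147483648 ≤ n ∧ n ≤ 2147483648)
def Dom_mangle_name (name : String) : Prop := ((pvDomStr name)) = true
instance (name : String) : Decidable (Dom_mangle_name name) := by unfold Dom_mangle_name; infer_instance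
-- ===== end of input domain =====

-- B replaces A's one-pass last-tracking loop by transliterate-then-collapse-underscore-runs; same cost, different decomposition.

-- ===== PORT A =====
-- one loop iteration of A: state is (last, deduped)
def mangleStep (st : String × List Char) (char : Char) : String × List Char :=
  if !(PySem.Chars.isalpha char) && !(PySem.Chars.isdigit char) then
    if st.1 = "_" then st                        -- continue
    else ("_", st.2 ++ ['_'])                    -- char = '_'; last = char; append
  else (String.ofList [char], st.2 ++ [char])    -- last = char; append

def mangle_name (name : String) : String :=
  PySem.Str.upper (String.ofList (name.toList.foldl mangleStep ("", [])).2)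

-- ===== PORT B =====
def mangleAltMap (c : Char) : Char :=
  if PySem.Chars.isalpha c || PySem.Chars.isdigit c then c else '_'

-- the while loop of Source B: emit the char, and after a '_' skip the rest of the run
def mangleAltCollapse : List Char → List Char
  | [] => []
  | c :: rest =>
    if c = '_' then c :: mangleAltCollapse (rest.dropWhile (· = '_'))
    else c :: mangleAltCollapse rest
  termination_by l => l.length
  decreasing_by
    · have := List.length_dropWhile_le (fun x => x = '_') rest
      simp; omega
    · simp

def mangle_name_alt (name : String) : String :=
  PySem.Str.upper (String.ofList (mangleAltCollapse (name.toList.map mangleAltMap)))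

-- ===== PRECONDITION & SPEC =====
def Spec_mangle_name (name : String) (out : String) : Prop := out = mangle_name_alt name
instance (name : String) (out : String) : Decidable (Spec_mangle_name name out) := by unfold Spec_mangle_name; infer_instance

-- ===== CLAIM (what is proved, stated in full; the proofs are below) =====
def Claim_equal_mangle_name : Prop := ∀ (name : String), Dom_mangle_name name → Spec_mangle_name name (mangle_name name)

-- ===== LEMMAS AND PROOFS =====

lemma mangleAltMap_of_alnum {c : Char} (h : (PySem.Chars.isalpha c || PySem.Chars.isdigit c) = true) :
    mangleAltMap c = c := by simp [mangleAltMap, h]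

lemma alnum_ne_underscore {c : Char} (h : (PySem.Chars.isalpha c || PySem.Chars.isdigit c) = true) :
    c ≠ '_' := by
  intro hc; subst hc; exact absurd h (by decide)

lemma ofList_singleton_ne_underscore {c : Char} (h : c ≠ '_') : String.ofList [c] ≠ "_" := by
  intro he
  apply h
  have := congrArg String.toList he
  simpa using this

-- the loop invariant: A's fold equals B's collapse of the transliterated tail,
-- with the leading underscore run dropped when the last appended char was '_'
lemma mangle_loop_eq (l : List Char) : ∀ (last : String) (acc : List Char),
    (l.foldl mangleStep (last, acc)).2 =
      acc ++ (if last = "_"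
              then mangleAltCollapse ((l.map mangleAltMap).dropWhile (· = '_'))
              else mangleAltCollapse (l.map mangleAltMap)) := by
  induction l with
  | nil => intro last acc; simp [mangleAltCollapse]
  | cons c l ih =>
    intro last acc
    by_cases hb : (PySem.Chars.isalpha c || PySem.Chars.isdigit c) = true
    · -- letter or digit: kept as-is, cannot be '_'
      have hc : c ≠ '_' := alnum_ne_underscore hb
      have hcond : (!(PySem.Chars.isalpha c) && !(PySem.Chars.isdigit c)) = false := by
        cases ha : PySem.Chars.isalpha c <;> cases hd : PySem.Chars.isdigit c <;> simp_all
      have hstep : mangleStep (last, acc) c = (String.ofList [c], acc ++ [c]) := by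
        simp [mangleStep, hcond]
      rw [List.foldl_cons, hstep, ih]
      by_cases hl : last = "_" <;>
        simp [hl, mangleAltMap_of_alnum hb, mangleAltCollapse, hc,
              ofList_singleton_ne_underscore hc]
    · -- not a letter/digit: transliterated to '_'
      have hm : mangleAltMap c = '_' := by
        simp only [mangleAltMap]; rw [if_neg]; simpa using hb
      have hcond : (!(PySem.Chars.isalpha c) && !(PySem.Chars.isdigit c)) = true := by
        simp at hb ⊢; tauto
      by_cases hl : last = "_"
      · subst hl
        have hstep : mangleStep ("_", acc) c = ("_", acc) := by
          simp [mangleStep, hcond]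
        rw [List.foldl_cons, hstep, ih]
        simp [hm]
      · have hstep : mangleStep (last, acc) c = ("_", acc ++ ['_']) := by
          simp [mangleStep, hcond, hl]
        rw [List.foldl_cons, hstep, ih]
        simp [hl, hm, mangleAltCollapse]

-- ===== VERDICT (by name: the statement is the Claim_ definition above) =====
theorem mangle_name_spec : Claim_equal_mangle_name := by
  intro name _
  unfold Spec_mangle_name mangle_name mangle_name_alt
  rw [mangle_loop_eq, if_neg (by decide)]
  simp
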